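-- pv_equiv track=rewrite | github.com/rafamdr/coding_chanllenges | contained_items/main.py | contained_items_v3
-- ===== SOURCE A (Python) =====
-- from typing import List, Dict
--
-- def contained_items_v3(text: str, indices: List[tuple[int, int]]) -> Dict[tuple[int, int], int]:
--     COUNT, LOCAL_COUNT, STATE = 0, 1, 2
--     indices_dict = {(start, end): [0, 0, 0] for (start, end) in indices}
--     for i, ch in enumerate(text):
--         for (start, end) in indices_dict:
--             if start <= i < end:
--                 if ch == '|':
--                     indices_dict[(start, end)][COUNT] += indices_dict[(start, end)][LOCAL_COUNT]
--                     indices_dict[(start, end)][LOCAL_COUNT] = 0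
--                     indices_dict[(start, end)][STATE] = 1
--                 else:
--                     indices_dict[(start, end)][LOCAL_COUNT] += indices_dict[(start, end)][STATE]
--
--     for (start, end) in indices_dict:
--         indices_dict[(start, end)] = indices_dict[(start, end)][COUNT]
--
--     return indices_dict
-- ===== SOURCE B (Python) =====
-- from typing import List, Dict
--
-- def contained_items_v3(text: str, indices: List[tuple[int, int]]) -> Dict[tuple[int, int], int]:
--     # One pass over the text: bar positions + prefix counts of bars; then O(1) per query.
--     T = len(text)
--     bars = []
--     pb = [0]
--     c = 0
--     for i, ch in enumerate(text):
--         if ch == '|':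
--             bars.append(i)
--             c += 1
--         pb.append(c)
--     result = {}
--     for (start, end) in indices:
--         if (start, end) in result:
--             continue
--         lo = pb[min(max(start, 0), T)]
--         hi = pb[min(max(end, 0), T)]
--         result[(start, end)] = (bars[hi - 1] - bars[lo] + 1) - (hi - lo) if hi - lo >= 2 else 0
--     return result
-- ===== Notes on version B (the rewrite author's own statement) =====
-- stated objective: faster
-- what changed: Replaces the per-character scan over every interval (a state machine run for each dict key on each character) with one pass over the text collecting bar positions and a prefix-count array, then answers each distinct interval in O(1) from the first/last bar and the bar count inside it.
import Mathlib
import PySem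

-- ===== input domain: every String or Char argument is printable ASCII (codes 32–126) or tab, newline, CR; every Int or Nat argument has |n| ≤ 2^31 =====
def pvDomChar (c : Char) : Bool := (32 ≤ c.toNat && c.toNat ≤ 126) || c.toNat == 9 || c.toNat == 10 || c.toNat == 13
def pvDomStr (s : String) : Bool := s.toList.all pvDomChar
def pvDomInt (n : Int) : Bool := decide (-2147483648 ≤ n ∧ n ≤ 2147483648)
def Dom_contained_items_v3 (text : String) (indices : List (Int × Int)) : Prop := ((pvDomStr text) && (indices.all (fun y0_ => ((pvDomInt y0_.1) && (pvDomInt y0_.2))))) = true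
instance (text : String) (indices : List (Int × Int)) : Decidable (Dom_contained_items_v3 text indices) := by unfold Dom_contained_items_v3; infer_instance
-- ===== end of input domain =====

-- B replaces A's per-character update of every interval's state machine by one scan of the
-- text (bar positions + prefix bar-counts) and an O(1) lookup per distinct interval; the
-- timing run measured it faster. Equivalence of the RETURN value is proved for all inputs.

-- ===== PORT A =====
-- loop body of A's inner 'for (start, end) in indices_dict'
def pvAUpd (p : Int × Char) (d : PySem.Dict (Int × Int) (Int × Int × Int)) (k : Int × Int) :
    PySem.Dict (Int × Int) (Int × Int × Int) :=
  if k.1 ≤ p.1 ∧ p.1 < k.2 then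
    if p.2 = '|' then d.modify k (0, 0, 0) (fun v => (v.1 + v.2.1, 0, 1))
    else d.modify k (0, 0, 0) (fun v => (v.1, v.2.1 + v.2.2, v.2.2))
  else d

-- A's inner loop: iterate over the dict's keys, updating values in place
def pvAInner (p : Int × Char) (d : PySem.Dict (Int × Int) (Int × Int × Int)) :
    PySem.Dict (Int × Int) (Int × Int × Int) :=
  d.keys.foldl (pvAUpd p) d

def contained_items_v3 (text : String) (indices : List (Int × Int)) : List (Int × Int × Int) :=
  -- indices_dict = {(start, end): [0, 0, 0] for (start, end) in indices}
  let d0 : PySem.Dict (Int × Int) (Int × Int × Int) :=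
    indices.foldl (fun d k => d.insert k (0, 0, 0)) PySem.Dict.empty
  -- for i, ch in enumerate(text): for (start, end) in indices_dict: …
  let d1 := (PySem.List.enumerate text.toList 0).foldl (fun d p => pvAInner p d) d0
  -- final loop: indices_dict[(start, end)] = indices_dict[(start, end)][COUNT]
  (d1.items.map (fun q => (q.1.1, q.1.2, q.2.1)))

-- ===== PORT B =====
-- one pass over the text: bar positions, prefix bar-counts [0, …], running count
def pvBScan (cs : List Char) : List Int × List Int × Int :=
  (PySem.List.enumerate cs 0).foldl
    (fun (st : List Int × List Int × Int) p =>
      if p.2 = '|' then (st.1 ++ [p.1], st.2.1 ++ [st.2.2 + 1], st.2.2 + 1)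
      else (st.1, st.2.1 ++ [st.2.2], st.2.2))
    ([], [0], 0)

-- the value computed for one interval (pb/bars indices are provably in range, so pyGetD is exact)
def pvBVal (bars pb : List Int) (T : Int) (k : Int × Int) : Int :=
  let lo := PySem.List.pyGetD pb (min (max k.1 0) T) 0
  let hi := PySem.List.pyGetD pb (min (max k.2 0) T) 0
  if 2 ≤ hi - lo then
    (PySem.List.pyGetD bars (hi - 1) 0 - PySem.List.pyGetD bars lo 0 + 1) - (hi - lo)
  else 0

def contained_items_v3_alt (text : String) (indices : List (Int × Int)) : List (Int × Int × Int) :=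
  let T : Int := (text.toList.length : Int)
  let st := pvBScan text.toList
  let bars := st.1
  let pb := st.2.1
  let res : PySem.Dict (Int × Int) Int :=
    indices.foldl
      (fun d k => if d.contains k then d else d.insert k (pvBVal bars pb T k))
      PySem.Dict.empty
  res.items.map (fun q => (q.1.1, q.1.2, q.2))

-- ===== PRECONDITION & SPEC =====
def Spec_contained_items_v3 (text : String) (indices : List (Int × Int)) (out : List (Int × Int × Int)) : Prop := out = contained_items_v3_alt text indices
instance (text : String) (indices : List (Int × Int)) (out : List (Int × Int × Int)) : Decidable (Spec_contained_items_v3 text indices out) := by unfold Spec_contained_items_v3; infer_instance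

-- ===== CLAIM (what is proved, stated in full; the proofs are below) =====
def Claim_equal_contained_items_v3 : Prop := ∀ (text : String) (indices : List (Int × Int)), Dom_contained_items_v3 text indices → Spec_contained_items_v3 text indices (contained_items_v3 text indices)

-- ===== LEMMAS AND PROOFS =====

-- the per-key effect of A's inner-loop body
def pvG (p : Int × Char) (k : Int × Int) (v : Int × Int × Int) : Int × Int × Int :=
  if k.1 ≤ p.1 ∧ p.1 < k.2 then
    if p.2 = '|' then (v.1 + v.2.1, 0, 1) else (v.1, v.2.1 + v.2.2, v.2.2)
  else v

-- A's per-key state machine over the whole text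
def pvMA (k : Int × Int) (cs : List Char) : Int × Int × Int :=
  (PySem.List.enumerate cs 0).foldl (fun v p => pvG p k v) (0, 0, 0)

-- positions of '|' in cs, offset n
def pvBarsFrom : Int → List Char → List Int
  | _, [] => []
  | n, ch :: r => if ch = '|' then n :: pvBarsFrom (n + 1) r else pvBarsFrom (n + 1) r

-- number of '|' in cs
def pvCnt : List Char → Int
  | [] => 0
  | ch :: r => (if ch = '|' then 1 else 0) + pvCnt r

-- running bar counts (pb without its leading 0)
def pvPcs : Int → List Char → List Int
  | _, [] => []
  | c, ch :: r => (c + if ch = '|' then 1 else 0) :: pvPcs (c + if ch = '|' then 1 else 0) r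

-- bar-summary: (first, last, count) of the bars seen so far inside the interval
def pvAdd (o : Option (Int × Int × Int)) (n : Int) : Option (Int × Int × Int) :=
  match o with
  | none => some (n, n, 1)
  | some (f, _l, k) => some (f, n, k + 1)

-- decode a summary into A's machine state after position n (interval end e)
def pvEnc (e n : Int) (o : Option (Int × Int × Int)) : Int × Int × Int :=
  match o with
  | none => (0, 0, 0)
  | some (f, l, k) => (if 2 ≤ k then l - f + 1 - k else 0, min n e - l - 1, 1)

def pvInv (s e n : Int) (o : Option (Int × Int × Int)) : Prop :=
  ∀ f l k, o = some (f, l, k) → s ≤ f ∧ s ≤ l ∧ l < e ∧ l < n ∧ 1 ≤ k ∧ (k = 1 → f = l)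

-- ---- A-side dict reduction ----

theorem pvA_init_getD (l : List (Int × Int)) (d : PySem.Dict (Int × Int) (Int × Int × Int))
    (h : ∀ k, d.getD k (0, 0, 0) = (0, 0, 0)) (k : Int × Int) :
    (l.foldl (fun d k => d.insert k (0, 0, 0)) d).getD k (0, 0, 0) = (0, 0, 0) := by
  induction l generalizing d with
  | nil => exact h k
  | cons k0 l ih =>
      simp only [List.foldl_cons]
      exact ih _ (fun k => by rw [PySem.Dict.getD_insert]; split_ifs <;> simp [h]) 


theorem pvAUpd_getD (p : Int × Char) (d : PySem.Dict (Int × Int) (Int × Int × Int))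
    (k' k : Int × Int) :
    (pvAUpd p d k').getD k (0, 0, 0) =
      if k = k' then pvG p k (d.getD k (0, 0, 0)) else d.getD k (0, 0, 0) := by
  by_cases hk : k = k'
  · subst hk
    unfold pvAUpd pvG
    split_ifs with h1 h2 <;> simp_all
  · unfold pvAUpd
    split_ifs <;> simp [PySem.Dict.getD_modify, hk]


theorem pvAUpd_keys (p : Int × Char) (d : PySem.Dict (Int × Int) (Int × Int × Int))
    (k' : Int × Int) (h : k' ∈ d.keys) : (pvAUpd p d k').keys = d.keys := by
  have hc : d.contains k' = true := (PySem.Dict.contains_iff_mem_keys d k').mpr h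
  unfold pvAUpd
  split_ifs <;> simp [PySem.Dict.keys_modify, PySem.Dict.keys_insert_of_contains _ _ hc]


theorem pvAInnerFold_getD (p : Int × Char) (ks : List (Int × Int))
    (d : PySem.Dict (Int × Int) (Int × Int × Int)) (k : Int × Int) (hnd : ks.Nodup) :
    (ks.foldl (pvAUpd p) d).getD k (0, 0, 0) =
      if k ∈ ks then pvG p k (d.getD k (0, 0, 0)) else d.getD k (0, 0, 0) := by
  induction ks generalizing d with
  | nil => simp
  | cons k0 ks ih =>
      have hk0 : k0 ∉ ks := (List.nodup_cons.mp hnd).1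
      simp only [List.foldl_cons]
      rw [ih _ (List.nodup_cons.mp hnd).2, pvAUpd_getD]
      by_cases h1 : k = k0
      · subst h1; simp [hk0]
      · simp [h1]


theorem pvAInnerFold_keys (p : Int × Char) (ks : List (Int × Int))
    (d : PySem.Dict (Int × Int) (Int × Int × Int)) (h : ∀ x ∈ ks, x ∈ d.keys) :
    (ks.foldl (pvAUpd p) d).keys = d.keys := by
  induction ks generalizing d with
  | nil => simp
  | cons k0 ks ih =>
      simp only [List.foldl_cons]
      have hk := pvAUpd_keys p d k0 (h k0 (by simp))
      rw [ih (pvAUpd p d k0) (fun x hx => hk ▸ h x (List.mem_cons_of_mem _ hx)), hk]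


theorem pvAOuter (L : List (Int × Char)) (d : PySem.Dict (Int × Int) (Int × Int × Int))
    (hnd : d.keys.Nodup) :
    (L.foldl (fun d p => pvAInner p d) d).keys = d.keys ∧
      ∀ k ∈ d.keys, (L.foldl (fun d p => pvAInner p d) d).getD k (0, 0, 0) =
        L.foldl (fun v p => pvG p k v) (d.getD k (0, 0, 0)) := by
  induction L generalizing d with
  | nil => simp
  | cons p L ih =>
      have hkeys : (pvAInner p d).keys = d.keys :=
        pvAInnerFold_keys p d.keys d (fun x hx => hx)
      obtain ⟨ih1, ih2⟩ := ih (pvAInner p d) (by rw [hkeys]; exact hnd)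
      constructor
      · simp only [List.foldl_cons]; rw [ih1, hkeys]
      · intro k hk
        simp only [List.foldl_cons]
        rw [ih2 k (by rw [hkeys]; exact hk)]
        have : (pvAInner p d).getD k (0, 0, 0) = pvG p k (d.getD k (0, 0, 0)) := by
          unfold pvAInner
          rw [pvAInnerFold_getD p d.keys d k hnd]
          simp [hk]
        rw [this]


theorem pvA_eq_map (text : String) (indices : List (Int × Int)) :
    contained_items_v3 text indices =
      (PySem.List.dedup indices).map (fun k => (k.1, k.2, (pvMA k text.toList).1)) := by
  unfold contained_items_v3
  dsimp only
  have h := PySem.Dict.keys_foldl_insert indices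
    (fun (_ : PySem.Dict (Int × Int) (Int × Int × Int)) (_ : Int × Int) =>
      ((0 : Int), (0 : Int), (0 : Int))) PySem.Dict.empty
  have hkeys0 : (indices.foldl (fun d k => d.insert k (0, 0, 0))
      (PySem.Dict.empty : PySem.Dict (Int × Int) (Int × Int × Int))).keys
      = PySem.List.dedup indices := by
    rw [PySem.List.dedup_eq_ofList]
    exact h.trans rfl
  have hnd0 : (indices.foldl (fun d k => d.insert k (0, 0, 0))
      (PySem.Dict.empty : PySem.Dict (Int × Int) (Int × Int × Int))).keys.Nodup :=
    PySem.Dict.nodup_keys_foldl_insert indices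
      (fun (_ : PySem.Dict (Int × Int) (Int × Int × Int)) (_ : Int × Int) =>
        ((0 : Int), (0 : Int), (0 : Int))) PySem.Dict.empty
      (by rw [PySem.Dict.keys_empty]; exact List.nodup_nil)
  have hget0 : ∀ k, (indices.foldl (fun d k => d.insert k (0, 0, 0))
      (PySem.Dict.empty : PySem.Dict (Int × Int) (Int × Int × Int))).getD k (0, 0, 0)
      = (0, 0, 0) :=
    pvA_init_getD indices PySem.Dict.empty (fun k => PySem.Dict.getD_empty k _)
  obtain ⟨h1, h2⟩ := pvAOuter (PySem.List.enumerate text.toList 0)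
    (indices.foldl (fun d k => d.insert k (0, 0, 0)) PySem.Dict.empty) hnd0
  rw [PySem.Dict.items_eq_map_keys _ (by rw [h1]; exact hnd0) (0, 0, 0), h1, hkeys0,
    List.map_map]
  refine List.map_congr_left ?_
  intro k hk
  have hmem : k ∈ (indices.foldl (fun d k => d.insert k (0, 0, 0))
      (PySem.Dict.empty : PySem.Dict (Int × Int) (Int × Int × Int))).keys := by
    rw [hkeys0]; exact hk
  have hval := h2 k hmem
  rw [hget0] at hval
  simp only [Function.comp_apply, hval, pvMA]

-- ---- B-side reductions ----

theorem pvBScan_closed (cs : List Char) (n : Int) (b0 p0 : List Int) (c0 : Int) :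
    (PySem.List.enumerate cs n).foldl
        (fun (st : List Int × List Int × Int) p =>
          if p.2 = '|' then (st.1 ++ [p.1], st.2.1 ++ [st.2.2 + 1], st.2.2 + 1)
          else (st.1, st.2.1 ++ [st.2.2], st.2.2))
        (b0, p0, c0) =
      (b0 ++ pvBarsFrom n cs, p0 ++ pvPcs c0 cs, c0 + pvCnt cs) := by
  induction cs generalizing n b0 p0 c0 with
  | nil => simp [pvBarsFrom, pvPcs, pvCnt]
  | cons ch r ih =>
      rw [PySem.List.enumerate_cons, List.foldl_cons]
      by_cases hb : ch = '|'
      · simp only [hb, if_true]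
        rw [ih]
        simp [pvBarsFrom, pvPcs, pvCnt, List.append_assoc]
        ring
      · simp only [hb, if_false]
        rw [ih]
        simp [pvBarsFrom, pvPcs, pvCnt, hb, List.append_assoc]


theorem pvBScan_eq (cs : List Char) :
    pvBScan cs = (pvBarsFrom 0 cs, 0 :: pvPcs 0 cs, pvCnt cs) := by
  unfold pvBScan
  rw [pvBScan_closed]
  simp


theorem pvBFold_props (F : Int × Int → Int) (l : List (Int × Int))
    (d : PySem.Dict (Int × Int) Int) (hnd : d.keys.Nodup) :
    (l.foldl (fun d k => if d.contains k then d else d.insert k (F k)) d).keys =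
        PySem.Set.update d.keys l ∧
      ∀ k, (k ∈ d.keys → (l.foldl (fun d k => if d.contains k then d else d.insert k (F k)) d).getD k 0 = d.getD k 0) ∧
        (k ∉ d.keys → k ∈ l → (l.foldl (fun d k => if d.contains k then d else d.insert k (F k)) d).getD k 0 = F k) := by
  induction l generalizing d with
  | nil => exact ⟨rfl, fun k => ⟨fun _ => rfl, fun _ hk => by simp at hk⟩⟩
  | cons k0 l ih =>
      simp only [List.foldl_cons]
      by_cases hc : d.contains k0 = true
      · rw [if_pos hc]
        have hmem : k0 ∈ d.keys := (PySem.Dict.contains_iff_mem_keys d k0).mp hc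
        obtain ⟨ih1, ih2⟩ := ih d hnd
        refine ⟨?_, fun k => ⟨fun hk => (ih2 k).1 hk, fun hk hkl => ?_⟩⟩
        · rw [ih1]
          unfold PySem.Set.update
          rw [List.foldl_cons, PySem.Set.add_of_mem hmem]
        · rcases List.mem_cons.mp hkl with rfl | hkl
          · exact absurd hmem hk
          · exact (ih2 k).2 hk hkl
      · rw [if_neg hc]
        have hc' : d.contains k0 = false := by simpa using hc
        have hnmem : k0 ∉ d.keys := fun hm => hc ((PySem.Dict.contains_iff_mem_keys d k0).mpr hm)
        have hkeys' : (d.insert k0 (F k0)).keys = d.keys ++ [k0] :=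
          PySem.Dict.keys_insert_of_not_contains d _ hc'
        have hnd' : (d.insert k0 (F k0)).keys.Nodup := by
          rw [hkeys']
          refine List.Nodup.append hnd (List.nodup_singleton _) ?_
          intro a ha hb
          rw [List.mem_singleton] at hb
          subst hb
          exact hnmem ha
        obtain ⟨ih1, ih2⟩ := ih (d.insert k0 (F k0)) hnd'
        refine ⟨?_, fun k => ⟨fun hk => ?_, fun hk hkl => ?_⟩⟩
        · rw [ih1, hkeys']
          unfold PySem.Set.update
          rw [List.foldl_cons]
          congr 1
          unfold PySem.Set.add
          rw [if_neg (by simpa [List.contains_iff_mem] using hnmem)]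
        · have hk' : k ∈ (d.insert k0 (F k0)).keys := by rw [hkeys']; simp [hk]
          rw [(ih2 k).1 hk', PySem.Dict.getD_insert, if_neg (fun h => hnmem (by rw [← h]; exact hk))]
        · rcases List.mem_cons.mp hkl with rfl | hkl
          · have hk' : k ∈ (d.insert k (F k)).keys := by rw [hkeys']; simp
            rw [(ih2 k).1 hk', PySem.Dict.getD_insert, if_pos rfl]
          · by_cases hkk0 : k = k0
            · subst hkk0
              have hk' : k ∈ (d.insert k (F k)).keys := by rw [hkeys']; simp
              rw [(ih2 k).1 hk', PySem.Dict.getD_insert, if_pos rfl]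
            · have hk' : k ∉ (d.insert k0 (F k0)).keys := by
                rw [hkeys']
                simp [hk, hkk0]
              exact (ih2 k).2 hk' hkl


theorem pvB_eq_map (text : String) (indices : List (Int × Int)) :
    contained_items_v3_alt text indices =
      (PySem.List.dedup indices).map (fun k =>
        (k.1, k.2,
          pvBVal (pvBarsFrom 0 text.toList) (0 :: pvPcs 0 text.toList)
            (text.toList.length : Int) k)) := by
  unfold contained_items_v3_alt
  dsimp only
  rw [pvBScan_eq]
  obtain ⟨h1, h2⟩ := pvBFold_props
    (pvBVal (pvBarsFrom 0 text.toList) (0 :: pvPcs 0 text.toList) (text.toList.length : Int))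
    indices PySem.Dict.empty (by rw [PySem.Dict.keys_empty]; exact List.nodup_nil)
  have hkeys : (indices.foldl
      (fun d k => if d.contains k then d
        else d.insert k (pvBVal (pvBarsFrom 0 text.toList) (0 :: pvPcs 0 text.toList)
          (text.toList.length : Int) k)) PySem.Dict.empty).keys = PySem.List.dedup indices := by
    rw [h1, PySem.List.dedup_eq_ofList]
    rfl
  have hnd : (PySem.List.dedup indices).Nodup := by
    rw [PySem.List.dedup_eq_ofList]
    exact PySem.Set.nodup_ofList indices
  rw [PySem.Dict.items_eq_map_keys _ (by rw [hkeys]; exact hnd) 0, hkeys, List.map_map]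
  refine List.map_congr_left ?_
  intro k hk
  have hkin : k ∈ indices := by
    rw [PySem.List.dedup_eq_ofList] at hk
    exact (PySem.Set.mem_ofList indices k).mp hk
  have := (h2 k).2 (by rw [PySem.Dict.keys_empty]; exact List.not_mem_nil) hkin
  simp only [Function.comp_apply, this]


-- ---- core: the state machine equals the bars/prefix formula ----

theorem pvStep (s e n : Int) (o : Option (Int × Int × Int)) (ch : Char) (h : pvInv s e n o) :
    pvG (n, ch) (s, e) (pvEnc e n o) =
      pvEnc e (n + 1) (if ch = '|' ∧ s ≤ n ∧ n < e then pvAdd o n else o) := by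
  cases o with
  | none =>
      by_cases hb : ch = '|' <;> by_cases hin : s ≤ n ∧ n < e <;>
        simp [pvG, pvAdd, pvEnc, hb, hin] <;> omega
  | some t =>
      obtain ⟨f, l, k⟩ := t
      obtain ⟨h1, h2, h3, h4, h5, h6⟩ := h f l k rfl
      have hfl : 2 ≤ k ∨ (k = 1 ∧ f = l) := by
        by_cases hk : 2 ≤ k
        · exact Or.inl hk
        · exact Or.inr ⟨by omega, h6 (by omega)⟩
      by_cases hb : ch = '|' <;> by_cases hin : s ≤ n ∧ n < e <;>
        simp [pvG, pvAdd, pvEnc, hb, hin, Prod.ext_iff] <;>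
        rcases hfl with hk | ⟨hk, hfl⟩ <;> (try split_ifs) <;> omega


theorem pvInv_step (s e n : Int) (o : Option (Int × Int × Int)) (ch : Char) (h : pvInv s e n o) :
    pvInv s e (n + 1) (if ch = '|' ∧ s ≤ n ∧ n < e then pvAdd o n else o) := by
  intro f l k hx
  split_ifs at hx with hc
  · cases o with
    | none =>
        simp [pvAdd] at hx
        obtain ⟨rfl, rfl, rfl⟩ := hx
        exact ⟨hc.2.1, hc.2.1, hc.2.2, by omega, by omega, fun _ => rfl⟩
    | some t =>
        obtain ⟨f0, l0, k0⟩ := t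
        obtain ⟨h1, h2, h3, h4, h5, h6⟩ := h f0 l0 k0 rfl
        simp [pvAdd] at hx
        obtain ⟨rfl, rfl, rfl⟩ := hx
        exact ⟨h1, hc.2.1, hc.2.2, by omega, by omega, by omega⟩
  · obtain ⟨h1, h2, h3, h4, h5, h6⟩ := h f l k hx
    exact ⟨h1, h2, h3, by omega, h5, h6⟩


theorem pvMain (s e : Int) (cs : List Char) (n : Int) (o : Option (Int × Int × Int))
    (h : pvInv s e n o) :
    (PySem.List.enumerate cs n).foldl (fun v p => pvG p (s, e) v) (pvEnc e n o) =
      pvEnc e (n + cs.length)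
        ((pvBarsFrom n cs).foldl (fun o p => if s ≤ p ∧ p < e then pvAdd o p else o) o) := by
  induction cs generalizing n o with
  | nil => simp [pvBarsFrom]
  | cons ch r ih =>
      rw [PySem.List.enumerate_cons, List.foldl_cons, pvStep s e n o ch h,
        ih (n + 1) _ (pvInv_step s e n o ch h)]
      have hlen : n + 1 + (r.length : Int) = n + ((r.length + 1 : Nat) : Int) := by
        push_cast; ring
      by_cases hb : ch = '|' <;> by_cases hin : s ≤ n ∧ n < e <;>
        simp [pvBarsFrom, hb, hin, hlen]


theorem pvAdd_foldl (M : List Int) (f l k : Int) :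
    M.foldl pvAdd (some (f, l, k)) = some (f, M.getLastD l, k + M.length) := by
  induction M generalizing l k with
  | nil => simp
  | cons x M ih =>
      simp only [List.foldl_cons, pvAdd, ih, List.getLastD_cons, List.length_cons]
      have : k + 1 + (M.length : Int) = k + ((M.length + 1 : Nat) : Int) := by push_cast; ring
      rw [this]


theorem pvBarsFrom_mem (cs : List Char) (n p : Int) (h : p ∈ pvBarsFrom n cs) :
    n ≤ p ∧ p < n + cs.length := by
  induction cs generalizing n with
  | nil => simp [pvBarsFrom] at h
  | cons ch r ih =>
      unfold pvBarsFrom at h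
      split_ifs at h with hb
      · rcases List.mem_cons.mp h with h | h
        · simp [h]
        · have := ih (n + 1) h; constructor <;> [omega; (simp; omega)]
      · have := ih (n + 1) h; constructor <;> [omega; (simp; omega)]


theorem pvBarsFrom_sorted (cs : List Char) (n : Int) : (pvBarsFrom n cs).Pairwise (· < ·) := by
  induction cs generalizing n with
  | nil => simp [pvBarsFrom]
  | cons ch r ih =>
      unfold pvBarsFrom
      split_ifs with hb
      · exact List.Pairwise.cons (fun p hp => by have := pvBarsFrom_mem r (n + 1) p hp; omega) (ih (n + 1))
      · exact ih (n + 1)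


theorem pvPcs_getD (cs : List Char) (c0 : Int) (j : Nat) (h : j ≤ cs.length) :
    (c0 :: pvPcs c0 cs).getD j 0 = c0 + pvCnt (cs.take j) := by
  induction cs generalizing c0 j with
  | nil =>
      have : j = 0 := by simpa using h
      simp [this, pvCnt]
  | cons ch r ih =>
      cases j with
      | zero => simp [pvCnt]
      | succ j =>
          simp only [pvPcs, List.getD_cons_succ, List.take_succ_cons, pvCnt]
          rw [ih _ j (by simpa using h)]
          ring


theorem pvCnt_filter (cs : List Char) (n : Int) (j : Nat) (h : j ≤ cs.length) :
    pvCnt (cs.take j) =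
      ((pvBarsFrom n cs).filter (fun p => decide (p < n + (j : Int)))).length := by
  induction cs generalizing n j with
  | nil =>
      have : j = 0 := by simpa using h
      simp [this, pvCnt, pvBarsFrom]
  | cons ch r ih =>
      cases j with
      | zero =>
          simp only [List.take_zero, pvCnt]
          have hnone : ∀ p ∈ pvBarsFrom n (ch :: r), ¬ (p < n + ((0 : Nat) : Int)) := by
            intro p hp
            have := pvBarsFrom_mem _ _ _ hp
            push_cast
            omega
          rw [List.filter_eq_nil_iff.mpr (by intro p hp; simpa using hnone p hp)]
          simp
      | succ j =>
          have hrec := ih (n + 1) j (by simpa using h)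
          have hcast : n + ((j + 1 : Nat) : Int) = (n + 1) + (j : Int) := by push_cast; ring
          rw [List.take_succ_cons]
          unfold pvCnt pvBarsFrom
          rw [hcast, hrec]
          split_ifs with hb
          · rw [List.filter_cons, if_pos (by simp only [decide_eq_true_eq]; omega), List.length_cons]
            push_cast
            ring
          · simp

theorem pvSplit (s e : Int) (bs : List Int) (h : bs.Pairwise (· < ·)) :
    bs.filter (fun p => decide (s ≤ p) && decide (p < e)) =
      (bs.filter (fun p => decide (p < e))).drop (bs.filter (fun p => decide (p < s))).length := by
  induction bs with
  | nil => simp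
  | cons b bs ih =>
      obtain ⟨hall, hp⟩ := List.pairwise_cons.mp h
      by_cases hbs : b < s
      · have hns : ¬ s ≤ b := by omega
        by_cases hbe : b < e
        · simp only [List.filter_cons]
          simp [hns, hbs, hbe, ih hp, List.drop_succ_cons]
        · have L0 : List.filter (fun p => decide (s ≤ p) && decide (p < e)) (b :: bs) = [] := by
            rw [List.filter_eq_nil_iff]
            intro x hx
            rcases List.mem_cons.mp hx with rfl | hx
            · simp only [Bool.and_eq_true, decide_eq_true_eq]; omega
            · have := hall x hx
              simp only [Bool.and_eq_true, decide_eq_true_eq]; omega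
          have L1 : List.filter (fun p => decide (p < e)) (b :: bs) = [] := by
            rw [List.filter_eq_nil_iff]
            intro x hx
            rcases List.mem_cons.mp hx with rfl | hx
            · simp only [decide_eq_true_eq]; omega
            · have := hall x hx
              simp only [decide_eq_true_eq]; omega
          rw [L0, L1]
          simp
      · have hlo : List.filter (fun p => decide (p < s)) (b :: bs) = [] := by
          rw [List.filter_eq_nil_iff]
          intro x hx
          rcases List.mem_cons.mp hx with rfl | hx
          · simp only [decide_eq_true_eq]; omega
          · have := hall x hx
            simp only [decide_eq_true_eq]; omega
        rw [hlo]
        simp only [List.length_nil, List.drop_zero]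
        apply List.filter_congr
        intro x hx
        rcases List.mem_cons.mp hx with rfl | hx
        · have : s ≤ x := by omega
          simp [this]
        · have := hall x hx
          have hsx : s ≤ x := by omega
          simp [hsx]


theorem pvPrefix (e : Int) (bs : List Int) (h : bs.Pairwise (· < ·)) :
    bs.filter (fun p => decide (p < e)) = bs.takeWhile (fun p => decide (p < e)) := by
  induction bs with
  | nil => simp
  | cons b bs ih =>
      obtain ⟨hall, hp⟩ := List.pairwise_cons.mp h
      by_cases hb : b < e
      · simp [hb, ih hp]
      · have L1 : List.filter (fun p => decide (p < e)) (b :: bs) = [] := by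
          rw [List.filter_eq_nil_iff]
          intro x hx
          rcases List.mem_cons.mp hx with rfl | hx
          · simp only [decide_eq_true_eq]; omega
          · have := hall x hx
            simp only [decide_eq_true_eq]; omega
        rw [L1, List.takeWhile_cons, if_neg (by simpa using hb)]


theorem pvKeyEq (cs : List Char) (s e : Int) :
    (pvMA (s, e) cs).1 =
      pvBVal (pvBarsFrom 0 cs) (0 :: pvPcs 0 cs) (cs.length : Int) (s, e) := by
  have hsorted := pvBarsFrom_sorted cs 0
  have hmem0 : ∀ p ∈ pvBarsFrom 0 cs, 0 ≤ p ∧ p < (cs.length : Int) := by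
    intro p hp
    have := pvBarsFrom_mem cs 0 p hp
    omega
  have hmach : pvMA (s, e) cs =
      pvEnc e ((0 : Int) + cs.length)
        (((pvBarsFrom 0 cs).filter
            (fun p => decide (s ≤ p) && decide (p < e))).foldl pvAdd none) := by
    have hfun : (fun (o : Option (Int × Int × Int)) p =>
          if (decide (s ≤ p) && decide (p < e)) = true then pvAdd o p else o)
        = (fun o p => if s ≤ p ∧ p < e then pvAdd o p else o) := by
      funext o p
      by_cases hc : s ≤ p ∧ p < e
      · rw [if_pos (by simp [hc.1, hc.2]), if_pos hc]
      · rw [if_neg (by simp only [Bool.and_eq_true, decide_eq_true_eq]; exact hc), if_neg hc]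
    rw [List.foldl_filter, hfun]
    exact pvMain s e cs 0 none (by intro f l k h; simp at h)
  have hlookup : ∀ x : Int, PySem.List.pyGetD (0 :: pvPcs 0 cs) (min (max x 0) (cs.length : Int)) 0
      = (((pvBarsFrom 0 cs).filter (fun p => decide (p < x))).length : Int) := by
    intro x
    have h0 : (0 : Int) ≤ min (max x 0) (cs.length : Int) := by omega
    have hj : ((min (max x 0) (cs.length : Int)).toNat : Int)
        = min (max x 0) (cs.length : Int) := Int.toNat_of_nonneg h0
    have hle : (min (max x 0) (cs.length : Int)).toNat ≤ cs.length := by omega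
    rw [← hj, PySem.List.pyGetD_natCast, pvPcs_getD cs 0 _ hle, zero_add,
      pvCnt_filter cs 0 _ hle]
    have heq : List.filter
          (fun p => decide (p < 0 + ((min (max x 0) (cs.length : Int)).toNat : Int)))
          (pvBarsFrom 0 cs)
        = List.filter (fun p => decide (p < x)) (pvBarsFrom 0 cs) :=
      List.filter_congr (fun p hp => by
        have := hmem0 p hp
        exact decide_eq_decide.mpr (by omega))
    rw [heq]
  unfold pvBVal
  dsimp only
  rw [hlookup s, hlookup e, hmach]
  have hsplit : (pvBarsFrom 0 cs).filter (fun p => decide (s ≤ p) && decide (p < e))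
      = ((pvBarsFrom 0 cs).filter (fun p => decide (p < e))).drop
          ((pvBarsFrom 0 cs).filter (fun p => decide (p < s))).length :=
    pvSplit s e _ hsorted
  have hpre : (pvBarsFrom 0 cs).filter (fun p => decide (p < e))
      <+: pvBarsFrom 0 cs := by
    rw [pvPrefix e _ hsorted]
    exact List.takeWhile_prefix _
  rcases hM : (pvBarsFrom 0 cs).filter (fun p => decide (s ≤ p) && decide (p < e))
    with _ | ⟨m0, M'⟩
  · have hle2 : ((pvBarsFrom 0 cs).filter (fun p => decide (p < e))).length ≤
        ((pvBarsFrom 0 cs).filter (fun p => decide (p < s))).length :=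
      List.drop_eq_nil_iff.mp (by rw [← hsplit, hM])
    simp only [List.foldl_nil, pvEnc]
    rw [if_neg (by omega)]
  · rw [hM] at hsplit
    have hlt : ((pvBarsFrom 0 cs).filter (fun p => decide (p < s))).length <
        ((pvBarsFrom 0 cs).filter (fun p => decide (p < e))).length := by
      by_contra hcon
      have : ((pvBarsFrom 0 cs).filter (fun p => decide (p < e))).drop
          ((pvBarsFrom 0 cs).filter (fun p => decide (p < s))).length = [] :=
        List.drop_eq_nil_iff.mpr (by omega)
      rw [← hsplit] at this
      simp at this
    have hlen : M'.length + 1 =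
        ((pvBarsFrom 0 cs).filter (fun p => decide (p < e))).length -
          ((pvBarsFrom 0 cs).filter (fun p => decide (p < s))).length := by
      have := congrArg List.length hsplit
      simpa [List.length_drop] using this
    have hbarlen : ((pvBarsFrom 0 cs).filter (fun p => decide (p < e))).length ≤
        (pvBarsFrom 0 cs).length := List.length_filter_le _ _
    -- machine value
    rw [List.foldl_cons]
    have : pvAdd none m0 = some (m0, m0, 1) := rfl
    rw [this, pvAdd_foldl M' m0 m0 1]
    -- index facts
    have hEB : ∀ (i : Nat), i < ((pvBarsFrom 0 cs).filter (fun p => decide (p < e))).length →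
        (pvBarsFrom 0 cs)[i]? = ((pvBarsFrom 0 cs).filter (fun p => decide (p < e)))[i]? := by
      intro i hi
      obtain ⟨t, ht⟩ := hpre
      conv_lhs => rw [← ht]
      rw [List.getElem?_append_left hi]
    have hidx0 : PySem.List.pyGetD (pvBarsFrom 0 cs)
        ((((pvBarsFrom 0 cs).filter (fun p => decide (p < s))).length : Int)) 0 = m0 := by
      rw [PySem.List.pyGetD_natCast, List.getD_eq_getElem?_getD, hEB _ (by omega)]
      have h3 : (((pvBarsFrom 0 cs).filter (fun p => decide (p < e))).drop
            ((pvBarsFrom 0 cs).filter (fun p => decide (p < s))).length)[0]?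
          = ((pvBarsFrom 0 cs).filter (fun p => decide (p < e)))[
            ((pvBarsFrom 0 cs).filter (fun p => decide (p < s))).length + 0]? :=
        List.getElem?_drop
      rw [Nat.add_zero] at h3
      rw [← h3, ← hsplit]
      rfl
    have hlast : PySem.List.pyGetD (pvBarsFrom 0 cs)
        ((((pvBarsFrom 0 cs).filter (fun p => decide (p < e))).length : Int) - 1) 0
        = M'.getLastD m0 := by
      have hcast : ((((pvBarsFrom 0 cs).filter (fun p => decide (p < e))).length : Int) - 1)
          = (((((pvBarsFrom 0 cs).filter (fun p => decide (p < e))).length - 1 : Nat)) : Int) := by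
        omega
      rw [hcast, PySem.List.pyGetD_natCast, List.getD_eq_getElem?_getD, hEB _ (by omega)]
      have h3 : (((pvBarsFrom 0 cs).filter (fun p => decide (p < e))).drop
            ((pvBarsFrom 0 cs).filter (fun p => decide (p < s))).length)[
            ((pvBarsFrom 0 cs).filter (fun p => decide (p < e))).length - 1 -
              ((pvBarsFrom 0 cs).filter (fun p => decide (p < s))).length]?
          = ((pvBarsFrom 0 cs).filter (fun p => decide (p < e)))[
            ((pvBarsFrom 0 cs).filter (fun p => decide (p < s))).length +
              (((pvBarsFrom 0 cs).filter (fun p => decide (p < e))).length - 1 -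
                ((pvBarsFrom 0 cs).filter (fun p => decide (p < s))).length)]? :=
        List.getElem?_drop
      have hix : ((pvBarsFrom 0 cs).filter (fun p => decide (p < s))).length +
            (((pvBarsFrom 0 cs).filter (fun p => decide (p < e))).length - 1 -
              ((pvBarsFrom 0 cs).filter (fun p => decide (p < s))).length)
          = ((pvBarsFrom 0 cs).filter (fun p => decide (p < e))).length - 1 := by
        omega
      rw [hix] at h3
      rw [← h3, ← hsplit]
      have hlen2 : ((pvBarsFrom 0 cs).filter (fun p => decide (p < e))).length - 1 -
            ((pvBarsFrom 0 cs).filter (fun p => decide (p < s))).length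
          = (m0 :: M').length - 1 := by
        simp only [List.length_cons]
        omega
      rw [hlen2, ← List.getLast?_eq_getElem?, List.getLast?_cons, List.getLastD_eq_getLast?]
      rfl
    rw [hidx0, hlast]
    simp only [pvEnc]
    by_cases h2 : 2 ≤ 1 + (M'.length : Int)
    · rw [if_pos h2, if_pos (by omega)]
      omega
    · rw [if_neg h2, if_neg (by omega)]


-- ===== VERDICT (by name: the statement is the Claim_ definition above) =====
theorem contained_items_v3_spec : Claim_equal_contained_items_v3 := by
  intro text indices _
  unfold Spec_contained_items_v3
  rw [pvA_eq_map, pvB_eq_map]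
  refine List.map_congr_left ?_
  intro k _
  have := pvKeyEq text.toList k.1 k.2
  simpa using congrArg (fun z => (k.1, k.2, z)) this
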